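-- pv_equiv track=rewrite | github.com/AntonAlonzo/imagpro_finals | plate_recognition.py | is_2w_v1_license_format_compliant
-- ===== SOURCE A (Python) =====
-- import string
--
-- dict_char_to_int = {
--     'O': '0',
--     'I': '1',
--     'J': '3',
--     'Z': '3',
--     'A': '4',
--     'L': '4', # TODO: perform more test to confirm this
--     'G': '6',
--     'S': '5'
-- }
--
-- dict_int_to_char = {
--     '0': 'O',
--     '1': 'I',
--     '3': 'J',
--     '4': 'A',
--     '6': 'G',
--     '5': 'S',
--     '@': 'D' # TODO: perform more test to confirm this
-- }
--
-- def is_2w_v1_license_format_compliant(text):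
--     # Motorcycle vehicle format: DDD LLL (L - letter, D - digit)
--     text_len = len(text)
--     if text_len < 6: return False, text
--     if text_len != 6:
--         # Double check if format exists in string
--         for i in range(text_len):
--             if (5 + i) < text_len and (
--                 (text[0 + i] in ['0', '1', '2', '3', '4', '5', '6', '7', '8', '9'] or text[0 + i] in dict_char_to_int.keys()) and
--                 (text[1 + i] in ['0', '1', '2', '3', '4', '5', '6', '7', '8', '9'] or text[1 + i] in dict_char_to_int.keys()) and
--                 (text[2 + i] in ['0', '1', '2', '3', '4', '5', '6', '7', '8', '9'] or text[2 + i] in dict_char_to_int.keys()) and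
--                 (text[3 + i] in string.ascii_uppercase or text[3 + i] in dict_int_to_char.keys()) and
--                 (text[4 + i] in string.ascii_uppercase or text[4 + i] in dict_int_to_char.keys()) and
--                 (text[5 + i] in string.ascii_uppercase or text[5 + i] in dict_int_to_char.keys())
--             ):
--                 return True, text[0+i:6+i]
--         return False, text
--     if (
--         (text[0] in ['0', '1', '2', '3', '4', '5', '6', '7', '8', '9'] or text[0] in dict_char_to_int.keys()) and
--         (text[1] in ['0', '1', '2', '3', '4', '5', '6', '7', '8', '9'] or text[1] in dict_char_to_int.keys()) and
--         (text[2] in ['0', '1', '2', '3', '4', '5', '6', '7', '8', '9'] or text[2] in dict_char_to_int.keys()) and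
--         (text[3] in string.ascii_uppercase or text[3] in dict_int_to_char.keys()) and
--         (text[4] in string.ascii_uppercase or text[4] in dict_int_to_char.keys()) and
--         (text[5] in string.ascii_uppercase or text[5] in dict_int_to_char.keys())
--     ):
--         return True, text
--     return False, text
-- ===== SOURCE B (Python) =====
-- import string
--
-- # digit-like = digits + keys of dict_char_to_int; letter-like = uppercase + keys of dict_int_to_char
-- DIGIT_LIKE = set('0123456789OIJZALGS')
-- LETTER_LIKE = set(string.ascii_uppercase) | set('013456@')
--
-- def is_2w_v1_license_format_compliant(text):
--     # One pass with run-length accumulators: lrun = letter-like run ending at the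
--     # current char, drun/d2/d3 = digit-like run lengths ending 1, 2 and 3 chars back.
--     # The first position where lrun >= 3 and d3 >= 3 ends the leftmost DDD LLL window.
--     lrun = drun = d2 = d3 = 0
--     for j, ch in enumerate(text):
--         lrun = lrun + 1 if ch in LETTER_LIKE else 0
--         if lrun >= 3 and d3 >= 3:
--             return True, text[j-5:j+1]
--         d3, d2, drun = d2, drun, (drun + 1 if ch in DIGIT_LIKE else 0)
--     return False, text
-- ===== Notes on version B (the rewrite author's own statement) =====
-- stated objective: faster
-- what changed: Replaces A's per-window re-checking of six characters (three-way length case split plus a sliding window testing six memberships at every offset) by a single streaming pass that maintains run-length accumulators (current letter-like run and the digit-like run lengths ending 1-3 characters back) and stops at the first position where a 3-letter run follows a 3-digit run; each character is classified once instead of up to six times.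
import Mathlib
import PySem

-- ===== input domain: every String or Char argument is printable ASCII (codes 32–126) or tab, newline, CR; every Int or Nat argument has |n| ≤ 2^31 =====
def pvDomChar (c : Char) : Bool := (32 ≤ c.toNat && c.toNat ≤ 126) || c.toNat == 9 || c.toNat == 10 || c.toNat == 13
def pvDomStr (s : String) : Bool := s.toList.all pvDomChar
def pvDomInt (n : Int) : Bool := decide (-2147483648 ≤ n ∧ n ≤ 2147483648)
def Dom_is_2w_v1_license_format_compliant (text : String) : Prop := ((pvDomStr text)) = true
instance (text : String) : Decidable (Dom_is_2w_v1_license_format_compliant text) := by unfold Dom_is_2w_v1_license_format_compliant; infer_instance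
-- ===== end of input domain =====

-- B replaces A's per-window six-membership re-checking (with a three-way length case split)
-- by a single streaming pass with run-length accumulators, classifying each character once (objective: faster, constant-factor).


-- ===== PORT A =====
def pvDigitsList : List Char := ['0','1','2','3','4','5','6','7','8','9']
def pvCtiKeys : List Char := ['O','I','J','Z','A','L','G','S']          -- dict_char_to_int.keys()
def pvAsciiUpper : List Char :=
  ['A','B','C','D','E','F','G','H','I','J','K','L','M','N','O','P','Q','R','S','T','U','V','W','X','Y','Z']
def pvItcKeys : List Char := ['0','1','3','4','6','5','@']              -- dict_int_to_char.keys()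

-- one membership clause of A: text[k] raises on a bad index; unreachable here (guard), none ↦ false
def pvDTestA (o : Option Char) : Bool :=
  match o with
  | some c => pvDigitsList.contains c || pvCtiKeys.contains c
  | none => false

def pvLTestA (o : Option Char) : Bool :=
  match o with
  | some c => pvAsciiUpper.contains c || pvItcKeys.contains c
  | none => false

-- the 'for i in range(text_len)' loop with its early return
def pvLoopA (text : String) (text_len : Int) : List Int → Option (Bool × String)
  | [] => none
  | i :: rest =>
    if decide (5 + i < text_len)
        && pvDTestA (PySem.Str.pyGet? text (0 + i))
        && pvDTestA (PySem.Str.pyGet? text (1 + i))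
        && pvDTestA (PySem.Str.pyGet? text (2 + i))
        && pvLTestA (PySem.Str.pyGet? text (3 + i))
        && pvLTestA (PySem.Str.pyGet? text (4 + i))
        && pvLTestA (PySem.Str.pyGet? text (5 + i))
    then some (true, PySem.Str.slice text (some (0 + i)) (some (6 + i)))
    else pvLoopA text text_len rest

def is_2w_v1_license_format_compliant (text : String) : Bool × String :=
  let text_len : Int := PySem.Str.len text
  if text_len < 6 then (false, text)
  else if text_len ≠ 6 then
    match pvLoopA text text_len (PySem.List.pyRange 0 text_len 1) with
    | some r => r
    | none => (false, text)
  else if pvDTestA (PySem.Str.pyGet? text 0)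
        && pvDTestA (PySem.Str.pyGet? text 1)
        && pvDTestA (PySem.Str.pyGet? text 2)
        && pvLTestA (PySem.Str.pyGet? text 3)
        && pvLTestA (PySem.Str.pyGet? text 4)
        && pvLTestA (PySem.Str.pyGet? text 5)
  then (true, text)
  else (false, text)

-- ===== PORT B =====
def pvDigitLike : List Char :=                                          -- set('0123456789OIJZALGS')
  ['0','1','2','3','4','5','6','7','8','9','O','I','J','Z','A','L','G','S']
def pvLetterLike : List Char :=                                         -- set(uppercase) | set('013456@')
  ['A','B','C','D','E','F','G','H','I','J','K','L','M','N','O','P','Q','R','S','T','U','V','W','X','Y','Z',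
   '0','1','3','4','6','5','@']

-- the 'for j, ch in enumerate(text)' pass; state = (lrun, drun, d2, d3) run-length accumulators
def pvLoopB (text : String) : List (Int × Char) → Int → Int → Int → Int → Bool × String
  | [], _, _, _, _ => (false, text)
  | (j, ch) :: rest, lrun, drun, d2, d3 =>
    let lrun' := if pvLetterLike.contains ch then lrun + 1 else 0
    if 3 ≤ lrun' ∧ 3 ≤ d3 then
      (true, PySem.Str.slice text (some (j - 5)) (some (j + 1)))
    else
      pvLoopB text rest lrun' (if pvDigitLike.contains ch then drun + 1 else 0) drun d2

def is_2w_v1_license_format_compliant_alt (text : String) : Bool × String :=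
  pvLoopB text (PySem.List.enumerate text.toList 0) 0 0 0 0

-- ===== PRECONDITION & SPEC =====
def Spec_is_2w_v1_license_format_compliant (text : String) (out : Bool × String) : Prop := out = is_2w_v1_license_format_compliant_alt text
instance (text : String) (out : Bool × String) : Decidable (Spec_is_2w_v1_license_format_compliant text out) := by unfold Spec_is_2w_v1_license_format_compliant; infer_instance

-- ===== CLAIM (what is proved, stated in full; the proofs are below) =====
def Claim_equal_is_2w_v1_license_format_compliant : Prop := ∀ (text : String), Dom_is_2w_v1_license_format_compliant text → Spec_is_2w_v1_license_format_compliant text (is_2w_v1_license_format_compliant text)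

-- ===== LEMMAS AND PROOFS =====

-- reference: does the 6-char window starting at i satisfy the format? (pure getD form)
def pvOk (l : List Char) (i : Nat) : Bool :=
  pvDigitLike.contains (l.getD i ' ') && pvDigitLike.contains (l.getD (i+1) ' ')
    && pvDigitLike.contains (l.getD (i+2) ' ')
    && pvLetterLike.contains (l.getD (i+3) ' ') && pvLetterLike.contains (l.getD (i+4) ' ')
    && pvLetterLike.contains (l.getD (i+5) ' ')

-- reference: first i' ≥ i with i'+5 < n and pvOk
def pvFirstHit (l : List Char) (i : Nat) : Option Nat :=
  if h : i + 5 < l.length then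
    (if pvOk l i then some i else pvFirstHit l (i + 1))
  else none
termination_by l.length - i
decreasing_by omega

def pvRender (text : String) (o : Option Nat) : Bool × String :=
  match o with
  | some i => (true, PySem.Str.slice text (some (i : Int)) (some ((i : Int) + 6)))
  | none => (false, text)

-- run length of p-satisfying chars ending at index j
def pvRunEnd (p : Char → Bool) (l : List Char) : Nat → Nat
  | 0 => if p (l.getD 0 ' ') then 1 else 0
  | j + 1 => if p (l.getD (j+1) ' ') then pvRunEnd p l j + 1 else 0

-- run length ending just before index j (0 at j = 0)
def pvPrevRun (p : Char → Bool) (l : List Char) : Nat → Nat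
  | 0 => 0
  | j + 1 => pvRunEnd p l j

theorem pvRunEnd_succ (p : Char → Bool) (l : List Char) (j : Nat) :
    pvRunEnd p l j = if p (l.getD j ' ') then pvPrevRun p l j + 1 else 0 := by
  cases j with
  | zero => simp [pvRunEnd, pvPrevRun]
  | succ k => simp [pvRunEnd, pvPrevRun]

theorem pvRunEnd_ge3 (p : Char → Bool) (l : List Char) (j : Nat) :
    3 ≤ pvRunEnd p l j ↔
      2 ≤ j ∧ p (l.getD j ' ') = true ∧ p (l.getD (j-1) ' ') = true ∧ p (l.getD (j-2) ' ') = true := by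
  match j with
  | 0 => simp [pvRunEnd]; split_ifs <;> omega
  | 1 => simp [pvRunEnd]; split_ifs <;> omega
  | (k+2 : Nat) =>
    show 3 ≤ pvRunEnd p l (k+2) ↔ _
    rw [show pvRunEnd p l (k+2) = if p (l.getD (k+2) ' ') then pvRunEnd p l (k+1) + 1 else 0 from rfl,
        pvRunEnd_succ p l (k+1)]
    simp only [pvPrevRun]
    rw [pvRunEnd_succ p l k]
    simp only [pvPrevRun, show k+2-1 = k+1 from rfl, show k+2-2 = k from rfl]
    split_ifs <;> simp_all

theorem pvPrevRun_ge3 (p : Char → Bool) (l : List Char) (m : Nat) :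
    3 ≤ pvPrevRun p l m ↔ 1 ≤ m ∧ 3 ≤ pvRunEnd p l (m-1) := by
  cases m with
  | zero => simp [pvPrevRun]
  | succ k => simp [pvPrevRun]

-- the streaming condition at position j ↔ the window starting at j-5 is OK
theorem pvCond_iff (l : List Char) (j : Nat) :
    (3 ≤ pvRunEnd (fun c => pvLetterLike.contains c) l j ∧
     3 ≤ pvPrevRun (fun c => pvDigitLike.contains c) l (j-2)) ↔
      (5 ≤ j ∧ pvOk l (j-5) = true) := by
  rw [pvRunEnd_ge3, pvPrevRun_ge3, pvRunEnd_ge3]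
  simp only [pvOk, Bool.and_eq_true]
  constructor
  . rintro ⟨⟨hj2, hL2, hL1, hL0⟩, hm, hj3, hD2, hD1, hD0⟩
    have h5 : 5 ≤ j := by omega
    refine ⟨h5, ⟨⟨⟨⟨?_, ?_⟩, ?_⟩, ?_⟩, ?_⟩, ?_⟩
    . rw [show j-5 = j-2-1-2 from by omega]; exact hD0
    . rw [show j-5+1 = j-2-1-1 from by omega]; exact hD1
    . rw [show j-5+2 = j-2-1 from by omega]; exact hD2
    . rw [show j-5+3 = j-2 from by omega]; exact hL0
    . rw [show j-5+4 = j-1 from by omega]; exact hL1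
    . rw [show j-5+5 = j from by omega]; exact hL2
  . rintro ⟨h5, ⟨⟨⟨⟨hD0, hD1⟩, hD2⟩, hL0⟩, hL1⟩, hL2⟩
    refine ⟨⟨by omega, ?_, ?_, ?_⟩, by omega, by omega, ?_, ?_, ?_⟩
    . rw [show j = j-5+5 from by omega]; exact hL2
    . rw [show j-1 = j-5+4 from by omega]; exact hL1
    . rw [show j-2 = j-5+3 from by omega]; exact hL0
    . rw [show j-2-1 = j-5+2 from by omega]; exact hD2
    . rw [show j-2-1-1 = j-5+1 from by omega]; exact hD1
    . rw [show j-2-1-2 = j-5 from by omega]; exact hD0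

theorem pvFirstHit_none (l : List Char) (i : Nat) (h : l.length ≤ i + 5) :
    pvFirstHit l i = none := by
  unfold pvFirstHit
  rw [dif_neg (by omega)]

-- past len - 5 the guard of A's loop never fires
theorem pvLoopA_none (text : String) (len a : Int) (h : len - 5 ≤ a) :
    pvLoopA text len (PySem.List.pyRange a len 1) = none := by
  have key : ∀ (n : Nat) (a : Int), (len - a).toNat ≤ n → len - 5 ≤ a →
      pvLoopA text len (PySem.List.pyRange a len 1) = none := by
    intro n
    induction n with
    | zero =>
      intro a hn _
      rw [PySem.List.pyRange_one_eq_nil (by omega)]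
      rfl
    | succ n ih =>
      intro a hn h
      by_cases hab : len ≤ a
      · rw [PySem.List.pyRange_one_eq_nil hab]; rfl
      · have hab' : a < len := by omega
        rw [PySem.List.pyRange_one_cons hab']
        unfold pvLoopA
        have hg : decide (5 + a < len) = false := by simp; omega
        rw [hg]
        simp only [Bool.false_and, Bool.false_eq_true, if_false]
        exact ih (a + 1) (by omega) (by omega)
  exact key (len - a).toNat a le_rfl h

-- A's membership clause in getD form
theorem pvDTestA_eq (text : String) (i : Int) (h0 : 0 ≤ i) (h1 : i < (text.toList.length : Int)) :
    pvDTestA (PySem.Str.pyGet? text i) = pvDigitLike.contains (text.toList.getD i.toNat ' ') := by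
  rw [show PySem.Str.pyGet? text i = PySem.List.pyGet? text.toList i from by simp [PySem.Str.pyGet?]]
  rw [PySem.List.pyGet?_eq_some_getElem text.toList h0 h1]
  rw [List.getD_eq_getElem text.toList ' ' (by omega)]
  simp only [pvDTestA]
  rw [show pvDigitLike = pvDigitsList ++ pvCtiKeys from rfl, List.contains_append]

theorem pvLTestA_eq (text : String) (i : Int) (h0 : 0 ≤ i) (h1 : i < (text.toList.length : Int)) :
    pvLTestA (PySem.Str.pyGet? text i) = pvLetterLike.contains (text.toList.getD i.toNat ' ') := by
  rw [show PySem.Str.pyGet? text i = PySem.List.pyGet? text.toList i from by simp [PySem.Str.pyGet?]]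
  rw [PySem.List.pyGet?_eq_some_getElem text.toList h0 h1]
  rw [List.getD_eq_getElem text.toList ' ' (by omega)]
  simp only [pvLTestA]
  rw [show pvLetterLike = pvAsciiUpper ++ pvItcKeys from rfl, List.contains_append]

-- A's scan equals the reference first-hit
theorem pvLoopA_eq (text : String) (a : Int) (ha : 0 ≤ a) :
    (match pvLoopA text (text.toList.length : Int) (PySem.List.pyRange a (text.toList.length : Int) 1) with
     | some r => r
     | none => (false, text))
      = pvRender text (pvFirstHit text.toList a.toNat) := by
  have key : ∀ (n : Nat) (a : Int), 0 ≤ a → ((text.toList.length : Int) - a).toNat ≤ n →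
      (match pvLoopA text (text.toList.length : Int) (PySem.List.pyRange a (text.toList.length : Int) 1) with
       | some r => r
       | none => (false, text))
        = pvRender text (pvFirstHit text.toList a.toNat) := by
    intro n
    induction n with
    | zero =>
      intro a ha hn
      rw [PySem.List.pyRange_one_eq_nil (by omega), pvFirstHit_none text.toList a.toNat (by omega)]
      rfl
    | succ n ih =>
      intro a ha hn
      by_cases han : (text.toList.length : Int) ≤ a
      · rw [PySem.List.pyRange_one_eq_nil han, pvFirstHit_none text.toList a.toNat (by omega)]
        rfl
      · have han' : a < (text.toList.length : Int) := by omega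
        by_cases h5 : 5 + a < (text.toList.length : Int)
        · rw [PySem.List.pyRange_one_cons han']
          unfold pvLoopA
          rw [show (decide (5 + a < (text.toList.length : Int))) = true from by simpa using h5]
          rw [pvDTestA_eq text (0 + a) (by omega) (by omega),
              pvDTestA_eq text (1 + a) (by omega) (by omega),
              pvDTestA_eq text (2 + a) (by omega) (by omega),
              pvLTestA_eq text (3 + a) (by omega) (by omega),
              pvLTestA_eq text (4 + a) (by omega) (by omega),
              pvLTestA_eq text (5 + a) (by omega) (by omega)]
          rw [show (0 + a).toNat = a.toNat from by omega,
              show (1 + a).toNat = a.toNat + 1 from by omega,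
              show (2 + a).toNat = a.toNat + 2 from by omega,
              show (3 + a).toNat = a.toNat + 3 from by omega,
              show (4 + a).toNat = a.toNat + 4 from by omega,
              show (5 + a).toNat = a.toNat + 5 from by omega]
          rw [pvFirstHit]
          rw [dif_pos (show a.toNat + 5 < text.toList.length from by omega)]
          simp only [Bool.true_and]
          rw [show (pvDigitLike.contains (text.toList.getD a.toNat ' ')
                && pvDigitLike.contains (text.toList.getD (a.toNat + 1) ' ')
                && pvDigitLike.contains (text.toList.getD (a.toNat + 2) ' ')
                && pvLetterLike.contains (text.toList.getD (a.toNat + 3) ' ')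
                && pvLetterLike.contains (text.toList.getD (a.toNat + 4) ' ')
                && pvLetterLike.contains (text.toList.getD (a.toNat + 5) ' '))
              = pvOk text.toList a.toNat from rfl]
          by_cases hok : pvOk text.toList a.toNat = true
          · rw [if_pos hok, if_pos hok]
            simp only [pvRender]
            rw [show (0 : Int) + a = ((a.toNat : Int)) from by omega,
                show (6 : Int) + a = ((a.toNat : Int)) + 6 from by omega]
          · rw [if_neg hok, if_neg hok]
            have := ih (a + 1) (by omega) (by omega)
            rw [show (a + 1).toNat = a.toNat + 1 from by omega] at this
            exact this
        · rw [PySem.List.pyRange_one_cons han']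
          unfold pvLoopA
          rw [show (decide (5 + a < (text.toList.length : Int))) = false
                from by simp only [decide_eq_false_iff_not]; omega]
          simp only [Bool.false_and, Bool.false_eq_true, if_false]
          rw [pvLoopA_none text _ (a + 1) (by omega),
              pvFirstHit_none text.toList a.toNat (by omega)]
          rfl
  exact key ((text.toList.length : Int) - a).toNat a ha le_rfl

-- B's streaming pass equals the reference first-hit
theorem pvLoopB_eq (text : String) (rest : List Char) (j : Nat)
    (hrest : rest = text.toList.drop j) :
    pvLoopB text (PySem.List.enumerate rest (j : Int))
        ((pvPrevRun (fun c => pvLetterLike.contains c) text.toList j : Nat) : Int)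
        ((pvPrevRun (fun c => pvDigitLike.contains c) text.toList j : Nat) : Int)
        ((pvPrevRun (fun c => pvDigitLike.contains c) text.toList (j-1) : Nat) : Int)
        ((pvPrevRun (fun c => pvDigitLike.contains c) text.toList (j-2) : Nat) : Int)
      = pvRender text (pvFirstHit text.toList (j - 5)) := by
  induction rest generalizing j with
  | nil =>
    have hlen : text.toList.length ≤ j := by
      have h := congrArg List.length hrest
      rw [List.length_nil, List.length_drop] at h
      omega
    rw [PySem.List.enumerate_nil, pvFirstHit_none text.toList (j - 5) (by omega)]
    rfl
  | cons c cs ih =>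
    have hj : j < text.toList.length := by
      by_contra h
      rw [List.drop_eq_nil_of_le (by omega)] at hrest
      exact absurd hrest (by simp)
    have hdrop := List.drop_eq_getElem_cons (l := text.toList) hj
    rw [hdrop] at hrest
    obtain ⟨hc, hcs⟩ : c = text.toList[j] ∧ cs = text.toList.drop (j + 1) := by
      constructor <;> [exact (List.cons.injEq _ _ _ _ ▸ hrest).1 ▸ rfl; exact (List.cons.injEq _ _ _ _ ▸ hrest).2 ▸ rfl]
    have hcd : c = text.toList.getD j ' ' := by
      rw [hc, List.getD_eq_getElem text.toList ' ' hj]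
    rw [PySem.List.enumerate_cons]
    unfold pvLoopB
    have hlrun : (if pvLetterLike.contains c = true
            then ((pvPrevRun (fun c => pvLetterLike.contains c) text.toList j : Nat) : Int) + 1 else 0)
          = ((pvRunEnd (fun c => pvLetterLike.contains c) text.toList j : Nat) : Int) := by
      rw [pvRunEnd_succ, hcd]
      split_ifs
      · push_cast; ring
      · simp
    have hdrun : (if pvDigitLike.contains c = true
            then ((pvPrevRun (fun c => pvDigitLike.contains c) text.toList j : Nat) : Int) + 1 else 0)
          = ((pvRunEnd (fun c => pvDigitLike.contains c) text.toList j : Nat) : Int) := by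
      rw [pvRunEnd_succ, hcd]
      split_ifs
      · push_cast; ring
      · simp
    simp only [hlrun, hdrun]
    by_cases hcond : (3 ≤ ((pvRunEnd (fun c => pvLetterLike.contains c) text.toList j : Nat) : Int) ∧
        3 ≤ ((pvPrevRun (fun c => pvDigitLike.contains c) text.toList (j - 2) : Nat) : Int))
    · rw [if_pos hcond]
      have hnat : 3 ≤ pvRunEnd (fun c => pvLetterLike.contains c) text.toList j ∧
          3 ≤ pvPrevRun (fun c => pvDigitLike.contains c) text.toList (j - 2) := by
        exact ⟨by exact_mod_cast hcond.1, by exact_mod_cast hcond.2⟩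
      obtain ⟨h5, hok⟩ := (pvCond_iff text.toList j).mp hnat
      rw [pvFirstHit, dif_pos (show (j - 5) + 5 < text.toList.length from by omega), if_pos hok]
      simp only [pvRender]
      rw [show (j : Int) - 5 = (((j - 5 : Nat) : Int)) from by omega,
          show (j : Int) + 1 = (((j - 5 : Nat) : Int)) + 6 from by omega]
    · rw [if_neg hcond,
          show ((j : Int) + 1) = (((j + 1 : Nat) : Int)) from by push_cast; ring]
      have step := ih (j + 1) hcs
      rw [show (j + 1) - 1 = j from rfl, show (j + 1) - 2 = j - 1 from rfl,
          show pvPrevRun (fun c => pvLetterLike.contains c) text.toList (j + 1)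
              = pvRunEnd (fun c => pvLetterLike.contains c) text.toList j from rfl,
          show pvPrevRun (fun c => pvDigitLike.contains c) text.toList (j + 1)
              = pvRunEnd (fun c => pvDigitLike.contains c) text.toList j from rfl] at step
      rw [step]
      by_cases h5 : 5 ≤ j
      · have hok : pvOk text.toList (j - 5) = false := by
          by_contra h
          exact hcond (by
            have := (pvCond_iff text.toList j).mpr ⟨h5, by simpa using h⟩
            exact ⟨by exact_mod_cast this.1, by exact_mod_cast this.2⟩)
        have hfh : pvFirstHit text.toList (j - 5) = pvFirstHit text.toList ((j + 1) - 5) := by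
          conv_lhs => rw [pvFirstHit]
          rw [dif_pos (show (j - 5) + 5 < text.toList.length from by omega),
              if_neg (by simp [hok]), show (j - 5) + 1 = (j + 1) - 5 from by omega]
        rw [hfh]
      · rw [show (j + 1) - 5 = j - 5 from by omega]

-- a full-length slice of a 6-char string is the string itself
theorem pvSliceFull (text : String) (h : text.toList.length = 6) :
    PySem.Str.slice text (some 0) (some 6) = text := by
  apply String.toList_inj.mp
  rw [PySem.Str.toList_slice]
  rw [show PySem.Chars.slice text.toList (some 0) (some 6)
        = PySem.List.slice text.toList (some 0) (some 6) from rfl]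
  rw [PySem.List.slice_toNat _ (by norm_num) (by norm_num)]
  simp [h, List.take_of_length_le]

-- ===== VERDICT (by name: the statement is the Claim_ definition above) =====
theorem is_2w_v1_license_format_compliant_spec : Claim_equal_is_2w_v1_license_format_compliant := by
  intro text _
  unfold Spec_is_2w_v1_license_format_compliant
  have hB : is_2w_v1_license_format_compliant_alt text = pvRender text (pvFirstHit text.toList 0) := by
    have := pvLoopB_eq text text.toList 0 (by simp)
    simpa [is_2w_v1_license_format_compliant_alt, pvPrevRun] using this
  rw [hB]
  unfold is_2w_v1_license_format_compliant
  rw [PySem.Str.len_eq]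
  by_cases h6 : (text.toList.length : Int) < 6
  · rw [if_pos h6]
    rw [pvFirstHit_none text.toList 0 (by omega), pvRender]
  · rw [if_neg h6]
    by_cases hne : (text.toList.length : Int) ≠ 6
    · rw [if_pos hne]
      have := pvLoopA_eq text 0 le_rfl
      simpa using this
    · have hn : text.toList.length = 6 := by omega
      rw [if_neg (by omega)]
      rw [pvDTestA_eq text 0 (by omega) (by omega), pvDTestA_eq text 1 (by omega) (by omega),
          pvDTestA_eq text 2 (by omega) (by omega), pvLTestA_eq text 3 (by omega) (by omega),
          pvLTestA_eq text 4 (by omega) (by omega), pvLTestA_eq text 5 (by omega) (by omega)]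
      rw [show ((0:Int).toNat) = 0 from rfl, show ((1:Int).toNat) = 1 from rfl,
          show ((2:Int).toNat) = 2 from rfl, show ((3:Int).toNat) = 3 from rfl,
          show ((4:Int).toNat) = 4 from rfl, show ((5:Int).toNat) = 5 from rfl]
      rw [show (pvDigitLike.contains (text.toList.getD 0 ' ')
            && pvDigitLike.contains (text.toList.getD 1 ' ')
            && pvDigitLike.contains (text.toList.getD 2 ' ')
            && pvLetterLike.contains (text.toList.getD 3 ' ')
            && pvLetterLike.contains (text.toList.getD 4 ' ')
            && pvLetterLike.contains (text.toList.getD 5 ' '))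
          = pvOk text.toList 0 from rfl]
      rw [pvFirstHit, dif_pos (show 0 + 5 < text.toList.length from by omega)]
      by_cases hok : pvOk text.toList 0 = true
      · rw [if_pos hok, if_pos hok]
        simp only [pvRender, Nat.cast_zero, zero_add]
        rw [pvSliceFull text hn]
      · rw [if_neg hok, if_neg hok,
            pvFirstHit_none text.toList 1 (by omega)]
        rfl
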